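-- pv_equiv track=rewrite | github.com/themaster567/FreemansAnomaly | Salo/scripts/sync_ltx_lines.py | folder_lang
-- ===== SOURCE A (Python) =====
-- def folder_lang(folder_name: str, lang_suffixes: dict[str, str]) -> str | None:
--     """
--     Return the language key whose suffix matches the end of folder_name.
--     Non-empty suffixes are tried longest-first so 'player_eng' beats 'player'.
--     Falls back to the language with an empty suffix (typically 'rus').
--     """
--     for lang, suffix in sorted(lang_suffixes.items(), key=lambda kv: len(kv[1]), reverse=True):
--         if suffix and folder_name.endswith(suffix):
--             return lang
--     # fallback: language with no suffix
--     for lang, suffix in lang_suffixes.items():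
--         if not suffix:
--             return lang
--     return None
-- ===== SOURCE B (Python) =====
-- def folder_lang(folder_name: str, lang_suffixes: dict[str, str]) -> str | None:
--     best_lang = None
--     best_len = 0
--     empty_lang = None
--     for lang, suffix in lang_suffixes.items():
--         if suffix:
--             if len(suffix) > best_len and folder_name.endswith(suffix):
--                 best_lang, best_len = lang, len(suffix)
--         elif empty_lang is None:
--             empty_lang = lang
--     return best_lang if best_lang is not None else empty_lang
-- ===== Notes on version B (the rewrite author's own statement) =====
-- stated objective: alternative
-- what changed: Replaces sort-the-items-then-return-first-match (plus a second fallback scan) with a single pass that keeps a running longest-matching-suffix best candidate and the first empty-suffix language.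
import Mathlib
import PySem

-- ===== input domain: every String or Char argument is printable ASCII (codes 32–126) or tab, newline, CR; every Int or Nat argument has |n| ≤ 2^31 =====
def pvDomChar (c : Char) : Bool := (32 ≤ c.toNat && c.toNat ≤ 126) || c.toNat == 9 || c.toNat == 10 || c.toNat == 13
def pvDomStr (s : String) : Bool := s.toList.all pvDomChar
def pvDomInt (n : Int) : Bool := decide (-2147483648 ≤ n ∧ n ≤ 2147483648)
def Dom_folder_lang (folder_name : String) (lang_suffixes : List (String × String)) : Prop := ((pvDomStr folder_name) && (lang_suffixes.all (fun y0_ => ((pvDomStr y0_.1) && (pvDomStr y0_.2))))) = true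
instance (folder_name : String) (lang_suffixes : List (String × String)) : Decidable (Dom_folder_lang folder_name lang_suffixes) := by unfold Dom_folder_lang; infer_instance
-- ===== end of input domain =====

-- B replaces A's sort-then-scan (plus a second fallback pass) by one left-to-right pass
-- keeping the longest matching suffix seen so far and the first empty-suffix language.


-- ===== PORT A =====
def folder_lang (folder_name : String) (lang_suffixes : List (String × String)) : Option String :=
  match (PySem.List.sorted lang_suffixes (fun kv => PySem.Str.len kv.2) true).find?
      (fun kv => decide (kv.2 ≠ "") && PySem.Str.endswith folder_name kv.2) with
  | some kv => some kv.1
  | none => (lang_suffixes.find? (fun kv => decide (kv.2 = ""))).map Prod.fst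

-- ===== PORT B =====
def folder_lang_alt_step (folder_name : String)
    (st : Option String × Int × Option String) (kv : String × String) :
    Option String × Int × Option String :=
  if kv.2 ≠ "" then
    if PySem.Str.len kv.2 > st.2.1 && PySem.Str.endswith folder_name kv.2 then
      (some kv.1, PySem.Str.len kv.2, st.2.2)
    else st
  else if st.2.2 = none then (st.1, st.2.1, some kv.1) else st

def folder_lang_alt (folder_name : String) (lang_suffixes : List (String × String)) : Option String :=
  let st := lang_suffixes.foldl (folder_lang_alt_step folder_name)
    ((none : Option String), (0 : Int), (none : Option String))
  match st.1 with
  | some l => some l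
  | none => st.2.2

-- ===== PRECONDITION & SPEC =====
def Spec_folder_lang (folder_name : String) (lang_suffixes : List (String × String)) (out : Option String) : Prop := out = folder_lang_alt folder_name lang_suffixes
instance (folder_name : String) (lang_suffixes : List (String × String)) (out : Option String) : Decidable (Spec_folder_lang folder_name lang_suffixes out) := by unfold Spec_folder_lang; infer_instance

-- ===== CLAIM (what is proved, stated in full; the proofs are below) =====
def Claim_equal_folder_lang : Prop := ∀ (folder_name : String) (lang_suffixes : List (String × String)), Dom_folder_lang folder_name lang_suffixes → Spec_folder_lang folder_name lang_suffixes (folder_lang folder_name lang_suffixes)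

-- ===== LEMMAS AND PROOFS =====

-- the match predicate of A's first loop, the key, and the fallback predicate
def flP (fn : String) (kv : String × String) : Bool :=
  decide (kv.2 ≠ "") && PySem.Str.endswith fn kv.2
def flKey (kv : String × String) : Int := PySem.Str.len kv.2
def flQ (kv : String × String) : Bool := decide (kv.2 = "")

-- inserting a non-matching element does not change the first match
theorem find?_insertBy_of_neg {α : Type} (p : α → Bool) (bef : α → α → Bool) (x : α)
    (l : List α) (hx : p x = false) :
    (PySem.List.insertBy bef x l).find? p = l.find? p := by
  induction l with
  | nil => simp [PySem.List.insertBy, hx]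
  | cons y ys ih =>
    simp only [PySem.List.insertBy]
    by_cases h : bef x y = true
    · simp [h, List.find?, hx]
    · simp only [h, if_neg] <;> cases hy : p y <;> simp [List.find?, hy, ih]

-- inserting a strictly-longer matching element makes it the first match
theorem find?_insertBy_new {α κ : Type} [LinearOrder κ] (p : α → Bool) (key : α → κ)
    (x : α) (l : List α) (hx : p x = true)
    (hall : ∀ y ∈ l, p y = true → key y < key x) :
    (PySem.List.insertBy (fun a b => decide (key b < key a)) x l).find? p = some x := by
  induction l with
  | nil => simp [PySem.List.insertBy, List.find?, hx]
  | cons y ys ih =>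
    simp only [PySem.List.insertBy]
    by_cases h : key y < key x
    · simp [h, List.find?, hx]
    · have hy : p y = false := by
        cases hpy : p y
        · rfl
        · exact absurd (hall y (by simp) hpy) h
      have : (decide (key y < key x)) = false := by simp [h]
      simp only [this, Bool.false_eq_true, if_neg, not_false_iff]
      simp only [List.find?, hy]
      exact ih (fun z hz hpz => hall z (by simp [hz]) hpz)

-- inserting a no-longer matching element into a key-descending list keeps the first match
theorem find?_insertBy_keep {α κ : Type} [LinearOrder κ] (p : α → Bool) (key : α → κ)
    (x b : α) (l : List α) (hsorted : l.Pairwise (fun a c => key c ≤ key a))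
    (hb : l.find? p = some b) (hxb : key x ≤ key b) :
    (PySem.List.insertBy (fun a c => decide (key c < key a)) x l).find? p = some b := by
  induction l with
  | nil => simp at hb
  | cons y ys ih =>
    have hmem : b ∈ y :: ys := List.mem_of_find?_eq_some hb
    simp only [PySem.List.insertBy]
    rcases List.pairwise_cons.mp hsorted with ⟨hy_ge, hys⟩
    have hby : key b ≤ key y := by
      rcases List.mem_cons.mp hmem with h | h
      · exact le_of_eq (congrArg key h)
      · exact hy_ge b h
    have hnb : ¬ key y < key x := not_lt.mpr (le_trans hxb hby)
    have : (decide (key y < key x)) = false := by simp [hnb]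
    simp only [this, Bool.false_eq_true, if_neg, not_false_iff]
    cases hpy : p y with
    | true =>
      have hyb : y = b := by simpa [List.find?, hpy] using hb
      subst hyb
      simp [List.find?, hpy]
    | false =>
      have hb' : ys.find? p = some b := by simpa [List.find?, hpy] using hb
      simp only [List.find?, hpy]
      exact ih hys hb'

-- the invariant of B's single pass
def flInv (fn : String) (xs : List (String × String))
    (st : Option String × Int × Option String) : Prop :=
  st.2.2 = (xs.find? (flQ)).map Prod.fst ∧
  ((∃ b, (PySem.List.sorted xs flKey true).find? (flP fn) = some b ∧
      st.1 = some b.1 ∧ st.2.1 = flKey b ∧ 0 < flKey b ∧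
      ∀ y ∈ xs, flP fn y = true → flKey y ≤ flKey b) ∨
   ((PySem.List.sorted xs flKey true).find? (flP fn) = none ∧
      st.1 = none ∧ st.2.1 = 0 ∧ ∀ y ∈ xs, flP fn y = false))

theorem sortedRev_append_singleton (xs : List (String × String)) (x : String × String) :
    PySem.List.sorted (xs ++ [x]) flKey true =
      PySem.List.insertBy (fun a c => decide (flKey c < flKey a)) x
        (PySem.List.sorted xs flKey true) := by
  rw [PySem.List.sorted_rev_eq_foldl_insertBy, PySem.List.sorted_rev_eq_foldl_insertBy,
    List.foldl_append]
  rfl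

theorem flKey_pos_of_ne (kv : String × String) (h : kv.2 ≠ "") : 0 < flKey kv := by
  have h' : kv.2.toList ≠ [] := by
    intro hnil
    exact h (String.toList_eq_nil_iff.mp hnil)
  have hlen : 0 < kv.2.toList.length := List.length_pos_iff.mpr h'
  simp only [flKey, PySem.Str.len_eq]
  exact_mod_cast hlen

theorem flInv_holds (fn : String) (xs : List (String × String)) :
    flInv fn xs (xs.foldl (folder_lang_alt_step fn) (none, 0, none)) := by
  induction xs using List.reverseRecOn with
  | nil =>
    constructor
    · rfl
    · right; simp [PySem.List.sorted]
  | append_singleton xs x ih =>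
    rw [List.foldl_append]
    set st := xs.foldl (folder_lang_alt_step fn) (none, 0, none) with hst
    rcases ih with ⟨hemp, hcase⟩
    rw [List.foldl_cons, List.foldl_nil]
    constructor
    · -- fallback component
      show (folder_lang_alt_step fn st x).2.2 = _
      rw [List.find?_append]
      by_cases hx2 : x.2 = ""
      · -- empty suffix: recorded iff nothing recorded yet
        have hpx : flQ x = true := by simp [flQ, hx2]
        cases hfq : xs.find? flQ with
        | some b =>
          have : st.2.2 = some b.1 := by rw [hemp, hfq]; rfl
          simp only [folder_lang_alt_step, hx2]
          simp [this, hfq]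
        | none =>
          have h22 : st.2.2 = none := by rw [hemp, hfq]; rfl
          simp only [folder_lang_alt_step, hx2]
          simp [h22, hfq, List.find?, hpx]
      · have hqx : flQ x = false := by simp [flQ, hx2]
        have hsame : (folder_lang_alt_step fn st x).2.2 = st.2.2 := by
          simp only [folder_lang_alt_step]
          rw [if_pos hx2]
          split <;> rfl
        rw [hsame, hemp]
        cases hfq : xs.find? flQ <;> simp [List.find?, hqx]
    · -- best-match component
      rw [sortedRev_append_singleton]
      by_cases hpx : flP fn x = true
      · have hx2 : x.2 ≠ "" := by
          intro h; simp [flP, h] at hpx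
        have hkx : 0 < flKey x := flKey_pos_of_ne x hx2
        have hends : PySem.Str.endswith fn x.2 = true := by
          have h := hpx
          unfold flP at h
          simp only [Bool.and_eq_true] at h
          exact h.2
        by_cases hgt : st.2.1 < flKey x
        · -- new best
          have hstep : folder_lang_alt_step fn st x = (some x.1, flKey x, st.2.2) := by
            have hc : (decide (PySem.Str.len x.2 > st.2.1) && PySem.Str.endswith fn x.2) = true := by
              rw [hends, Bool.and_true]
              exact decide_eq_true hgt
            simp only [folder_lang_alt_step]
            rw [if_pos hx2, if_pos hc]
            rfl
          rw [hstep]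
          left
          refine ⟨x, ?_, rfl, rfl, hkx, ?_⟩
          · apply find?_insertBy_new _ flKey x _ hpx
            intro y hy hpy
            have hy' : y ∈ xs := (PySem.List.mem_sorted _ _ _ _).mp hy
            rcases hcase with ⟨b, _, _, hb1, _, hall⟩ | ⟨_, _, h0, hallf⟩
            · exact lt_of_le_of_lt (hall y hy' hpy) (by rwa [hb1] at hgt)
            · rw [hallf y hy'] at hpy; cases hpy
          · intro y hy hpy
            rcases List.mem_append.mp hy with h | h
            · rcases hcase with ⟨b, _, _, hb1, _, hall⟩ | ⟨_, _, h0, hallf⟩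
              · exact le_of_lt (lt_of_le_of_lt (hall y h hpy) (by rwa [hb1] at hgt))
              · rw [hallf y h] at hpy; cases hpy
            · simp at h; subst h; exact le_refl _
        · -- not longer than current best
          have hstep : folder_lang_alt_step fn st x = st := by
            have hc : (decide (PySem.Str.len x.2 > st.2.1) && PySem.Str.endswith fn x.2) = false := by
              rw [hends, Bool.and_true]
              exact decide_eq_false hgt
            simp only [folder_lang_alt_step]
            rw [if_pos hx2, if_neg (by simp only [hc]; exact Bool.false_ne_true)]
          rw [hstep]
          rcases hcase with ⟨b, hfind, h1, h21, hbpos, hall⟩ | ⟨hfind, h1, h21, hallf⟩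
          · left
            refine ⟨b, ?_, h1, h21, hbpos, ?_⟩
            · apply find?_insertBy_keep _ flKey x b _ (PySem.List.sorted_pairwise_rev _ _) hfind
              rw [← h21]; exact not_lt.mp hgt
            · intro y hy hpy
              rcases List.mem_append.mp hy with h | h
              · exact hall y h hpy
              · simp at h; subst h; rw [← h21]; exact not_lt.mp hgt
          · exfalso
            rw [h21] at hgt
            exact hgt hkx
      · -- x does not match: nothing changes on the best side
        have hpx' : flP fn x = false := by simpa using hpx
        have hstep' : folder_lang_alt_step fn st x = st ∨
            folder_lang_alt_step fn st x = (st.1, st.2.1, some x.1) := by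
          simp only [folder_lang_alt_step]
          by_cases hx2 : x.2 = ""
          · rw [if_neg (by simp [hx2])]
            split
            · right; rfl
            · left; rfl
          · have hend : PySem.Str.endswith fn x.2 = false := by
              unfold flP at hpx'
              cases hE : PySem.Str.endswith fn x.2
              · rfl
              · rw [hE, Bool.and_true, decide_eq_true hx2] at hpx'; cases hpx'
            rw [if_pos hx2, if_neg (by simp only [hend, Bool.and_false]; exact Bool.false_ne_true)]
            left; rfl
        have hstep1 : (folder_lang_alt_step fn st x).1 = st.1 := by
          rcases hstep' with h | h <;> rw [h]
        have hstep2 : (folder_lang_alt_step fn st x).2.1 = st.2.1 := by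
          rcases hstep' with h | h <;> rw [h]
        rw [find?_insertBy_of_neg _ _ _ _ hpx']
        rcases hcase with ⟨b, hfind, h1, h21, hbpos, hall⟩ | ⟨hfind, h1, h21, hallf⟩
        · left
          refine ⟨b, hfind, by rw [hstep1, h1], by rw [hstep2, h21], hbpos, ?_⟩
          intro y hy hpy
          rcases List.mem_append.mp hy with h | h
          · exact hall y h hpy
          · simp at h; subst h; rw [hpx'] at hpy; cases hpy
        · right
          refine ⟨hfind, by rw [hstep1, h1], by rw [hstep2, h21], ?_⟩
          intro y hy
          rcases List.mem_append.mp hy with h | h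
          · exact hallf y h
          · simp at h; subst h; exact hpx'

-- ===== VERDICT (by name: the statement is the Claim_ definition above) =====
theorem folder_lang_spec : Claim_equal_folder_lang := by
  intro fn ls _
  show folder_lang fn ls = folder_lang_alt fn ls
  have hinv := flInv_holds fn ls
  unfold folder_lang folder_lang_alt
  rcases hinv with ⟨hemp, hcase⟩
  rcases hcase with ⟨b, hfind, h1, _, _, _⟩ | ⟨hfind, h1, _, _⟩
  · rw [show (PySem.List.sorted ls (fun kv => PySem.Str.len kv.2) true).find?
        (fun kv => decide (kv.2 ≠ "") && PySem.Str.endswith fn kv.2) =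
        (PySem.List.sorted ls flKey true).find? (flP fn) from rfl, hfind]
    simp [h1]
  · rw [show (PySem.List.sorted ls (fun kv => PySem.Str.len kv.2) true).find?
        (fun kv => decide (kv.2 ≠ "") && PySem.Str.endswith fn kv.2) =
        (PySem.List.sorted ls flKey true).find? (flP fn) from rfl, hfind]
    simp [h1, hemp]
    rfl
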